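-- pv_equiv track=rewrite | github.com/lynever/prac_programmars | 프로그래머스/unrated/181904. 세로 읽기/세로 읽기.py | solution
-- ===== SOURCE A (Python) =====
-- def solution(my_string, m, c):
--     answer, tmplst = '', []
--     for idx, val in enumerate(my_string):
--         if m == 1:
--             tmplst.append([val])
--         elif idx % m == 0:
--             tmp = [val]
--         elif idx % m == m - 1:
--             tmp.append(val)
--             tmplst.append(tmp)
--         else:
--             tmp.append(val)
--     for i in tmplst:
--         answer += i[c - 1]
--     return answer
-- ===== SOURCE B (Python) =====
-- def solution(my_string, m, c):
--     return ''.join(my_string[r * m : r * m + m][c - 1]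
--                    for r in range(len(my_string) // m))
-- ===== Notes on version B (the rewrite author's own statement) =====
-- stated objective: simpler
-- what changed: B replaces A's per-character enumerate loop that mutates a tmp row buffer and a grid list with direct arithmetic over rows: it computes the row count len(my_string)//m and joins the (c-1)-th character of each row slice, keeping no per-character state.
-- outside the precondition, e.g. on solution('', 0, 1): A returns '', B raises ZeroDivisionError
import Mathlib
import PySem

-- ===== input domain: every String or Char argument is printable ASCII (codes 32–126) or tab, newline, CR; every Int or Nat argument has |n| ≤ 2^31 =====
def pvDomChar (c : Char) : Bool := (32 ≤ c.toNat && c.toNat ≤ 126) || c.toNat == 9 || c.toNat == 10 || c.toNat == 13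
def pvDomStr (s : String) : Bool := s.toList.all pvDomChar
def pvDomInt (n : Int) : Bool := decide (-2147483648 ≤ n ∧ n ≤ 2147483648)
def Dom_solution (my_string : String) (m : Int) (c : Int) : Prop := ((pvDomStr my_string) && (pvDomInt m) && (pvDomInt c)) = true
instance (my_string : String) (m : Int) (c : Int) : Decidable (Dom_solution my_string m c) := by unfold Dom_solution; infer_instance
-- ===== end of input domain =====

-- B reads the grid by row arithmetic (len//m row slices joined) instead of A's per-character
-- state machine with a tmp row buffer; objective: simpler.

-- ===== PORT A =====
-- one step of A's 'for idx, val in enumerate(my_string)' loop; state = (tmplst, tmp)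
def solutionStep (m : Int) (st : List (List Char) × List Char) (p : Int × Char) :
    List (List Char) × List Char :=
  if m == 1 then (st.1 ++ [[p.2]], st.2)
  else if PySem.Int.mod p.1 m == 0 then (st.1, [p.2])
  else if PySem.Int.mod p.1 m == m - 1 then (st.1 ++ [st.2 ++ [p.2]], st.2 ++ [p.2])
  else (st.1, st.2 ++ [p.2])

def solution (my_string : String) (m : Int) (c : Int) : String :=
  -- 'for i in tmplst: answer += i[c-1]'; i[c-1] is none = IndexError outside Pre_, default unreached on Pre_
  String.ofList ((((PySem.List.enumerate my_string.toList 0).foldl (solutionStep m) ([], [])).1).foldl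
    (fun acc row => acc ++ [(PySem.List.pyGet? row (c - 1)).getD ' ']) [])

-- ===== PORT B =====
def solution_alt (my_string : String) (m : Int) (c : Int) : String :=
  String.ofList ((PySem.List.pyRange 0 (PySem.Int.floordiv (my_string.toList.length : Int) m) 1).map
    (fun r => (PySem.List.pyGet? (PySem.List.slice my_string.toList (some (r * m)) (some (r * m + m)))
      (c - 1)).getD ' '))

-- ===== PRECONDITION & SPEC =====
-- Pre_ excludes m = 0 (A raises ZeroDivisionError on nonempty strings; on the empty string A
-- returns '' only because the loop never runs, while B's len//m raises ZeroDivisionError) and,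
-- when at least one complete row exists, a column c whose index c-1 falls outside the row
-- (both programs raise IndexError there).
def Pre_solution (my_string : String) (m : Int) (c : Int) : Prop :=
  m ≠ 0 ∧ (1 ≤ m → m ≤ (my_string.toList.length : Int) → (-m ≤ c - 1 ∧ c - 1 < m))
instance (my_string : String) (m : Int) (c : Int) : Decidable (Pre_solution my_string m c) := by
  unfold Pre_solution; infer_instance
def pvWitness_solution : String × Int × Int := ("abcdef", 2, 1)

def Spec_solution (my_string : String) (m : Int) (c : Int) (out : String) : Prop := out = solution_alt my_string m c
instance (my_string : String) (m : Int) (c : Int) (out : String) : Decidable (Spec_solution my_string m c out) := by unfold Spec_solution; infer_instance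

-- ===== CLAIM (what is proved, stated in full; the proofs are below) =====
def Claim_equal_solution : Prop := ∀ (my_string : String) (m : Int) (c : Int), Dom_solution my_string m c → Pre_solution my_string m c → Spec_solution my_string m c (solution my_string m c)

-- ===== LEMMAS AND PROOFS =====

-- the complete rows of l when laid out M to a row
def grp (M : Nat) (l : List Char) : List (List Char) :=
  (List.range (l.length / M)).map (fun r => (l.drop (r * M)).take M)

-- functional mirror of A's state machine, producing only the list of completed rows
def rowsFrom (M : Nat) : List Char → Nat → List Char → List (List Char)
  | [], _, _ => []
  | v :: l, j, tmp =>
    if M = 1 then [v] :: rowsFrom M l (j + 1) tmp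
    else if j % M = 0 then rowsFrom M l (j + 1) [v]
    else if j % M = M - 1 then (tmp ++ [v]) :: rowsFrom M l (j + 1) (tmp ++ [v])
    else rowsFrom M l (j + 1) (tmp ++ [v])

lemma grp_step (M : Nat) (hM : 1 ≤ M) (l : List Char) :
    grp M l = if M ≤ l.length then (l.take M) :: grp M (l.drop M) else [] := by
  unfold grp
  by_cases h : M ≤ l.length
  · simp only [h, if_true, List.length_drop]
    rw [Nat.div_eq_sub_div hM h, List.range_succ_eq_map]
    simp only [List.map_cons, List.map_map]
    congr 1
    · simp
    · apply List.map_congr_left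
      intro r _
      simp only [Function.comp_apply, List.drop_drop]
      rw [Nat.succ_mul, Nat.add_comm]
  · simp only [h, if_false]
    have : l.length / M = 0 := Nat.div_eq_of_lt (by omega)
    simp [this]

lemma rowsFrom_spec (M : Nat) (hM : 1 ≤ M) :
    ∀ (l : List Char) (j : Nat) (tmp : List Char),
      rowsFrom M l j tmp =
        if j % M = 0 then grp M l
        else if M - j % M ≤ l.length then
          (tmp ++ l.take (M - j % M)) :: grp M (l.drop (M - j % M))
        else [] := by
  intro l
  induction l with
  | nil =>
    intro j tmp
    have hjM : j % M < M := Nat.mod_lt j (by omega)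
    simp only [rowsFrom]
    by_cases h0 : j % M = 0
    · simp [h0, grp]
    · have h2 : ¬ (M - j % M = 0) := by omega
      simp [h0, h2]
  | cons v l ih =>
    intro j tmp
    have hjM : j % M < M := Nat.mod_lt j (by omega)
    by_cases h1 : M = 1
    · subst h1
      simp only [rowsFrom, Nat.mod_one]
      rw [ih, grp_step 1 (by omega) (v :: l)]
      simp [Nat.mod_one]
    · have hM2 : 2 ≤ M := by omega
      have h1m : 1 % M = 1 := Nat.mod_eq_of_lt (by omega)
      by_cases h0 : j % M = 0
      · -- fresh row starts with v
        have hs : (j + 1) % M = 1 := by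
          rw [Nat.add_mod, h0, h1m]
          simpa using h1m
        obtain ⟨M', rfl⟩ : ∃ M', M = M' + 1 := ⟨M - 1, by omega⟩
        simp only [rowsFrom, if_neg h1, if_pos h0]
        rw [ih]
        simp only [hs, if_neg (by omega : ¬ (1 : Nat) = 0)]
        rw [grp_step (M' + 1) (by omega) (v :: l)]
        simp only [Nat.add_sub_cancel, List.take_succ_cons, List.drop_succ_cons,
          List.length_cons, Nat.add_le_add_iff_right]
        split_ifs with h
        · simp
        · rfl
      · by_cases hlast : j % M = M - 1
        · -- row completes with v
          have hs : (j + 1) % M = 0 := by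
            rw [Nat.add_mod, hlast, h1m]
            have h' : M - 1 + 1 = M := by omega
            rw [h', Nat.mod_self]
          simp only [rowsFrom, if_neg h1, if_neg h0, if_pos hlast]
          rw [ih]
          have hone : M - j % M = 1 := by omega
          simp only [hs, hone]
          simp
        · -- mid-row: append v to tmp
          have hlt : j % M + 1 < M := by omega
          have hs : (j + 1) % M = j % M + 1 := by
            rw [Nat.add_mod, h1m]
            exact Nat.mod_eq_of_lt (by omega)
          simp only [rowsFrom, if_neg h1, if_neg h0, if_neg hlast]
          rw [ih]
          simp only [hs, if_neg (by omega : ¬ j % M + 1 = 0)]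
          have harith : M - (j % M + 1) = M - j % M - 1 := by omega
          rw [harith]
          obtain ⟨g, hg⟩ : ∃ g, M - j % M = g + 1 + 1 := ⟨M - j % M - 2, by omega⟩
          rw [hg]
          simp only [Nat.add_sub_cancel, List.take_succ_cons, List.drop_succ_cons,
            List.length_cons, Nat.add_le_add_iff_right]
          split_ifs with h
          · simp
          · rfl

-- A's loop computes rowsFrom (positive m)
lemma foldA (m : Int) (M : Nat) (hm : m = (M : Int)) (hM : 1 ≤ M) :
    ∀ (l : List Char) (j : Nat) (T : List (List Char)) (tmp : List Char),
      ((PySem.List.enumerate l (j : Int)).foldl (solutionStep m) (T, tmp)).1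
        = T ++ rowsFrom M l j tmp := by
  intro l
  induction l with
  | nil => intro j T tmp; simp [PySem.List.enumerate_nil, rowsFrom]
  | cons v l ih =>
    intro j T tmp
    have hcast : ((j : Int) + 1) = ((j + 1 : Nat) : Int) := by push_cast; ring
    rw [PySem.List.enumerate_cons, List.foldl_cons, hcast]
    by_cases h1 : M = 1
    · have e : solutionStep m (T, tmp) ((j : Int), v) = (T ++ [[v]], tmp) := by
        simp only [solutionStep, beq_iff_eq, hm]
        rw [if_pos (by omega)]
      rw [e, ih]
      simp only [rowsFrom, if_pos h1]
      simp
    · by_cases h0 : j % M = 0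
      · have e : solutionStep m (T, tmp) ((j : Int), v) = (T, [v]) := by
          simp only [solutionStep, beq_iff_eq, hm, PySem.Int.mod_natCast]
          rw [if_neg (by omega), if_pos (by omega)]
        rw [e, ih]
        simp only [rowsFrom, if_neg h1, if_pos h0]
      · by_cases hlast : j % M = M - 1
        · have e : solutionStep m (T, tmp) ((j : Int), v) =
              (T ++ [tmp ++ [v]], tmp ++ [v]) := by
            simp only [solutionStep, beq_iff_eq, hm, PySem.Int.mod_natCast]
            rw [if_neg (by omega), if_neg (by omega), if_pos (by omega)]
          rw [e, ih]
          simp only [rowsFrom, if_neg h1, if_neg h0, if_pos hlast]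
          simp
        · have e : solutionStep m (T, tmp) ((j : Int), v) = (T, tmp ++ [v]) := by
            simp only [solutionStep, beq_iff_eq, hm, PySem.Int.mod_natCast]
            rw [if_neg (by omega), if_neg (by omega), if_neg (by omega)]
          rw [e, ih]
          simp only [rowsFrom, if_neg h1, if_neg h0, if_neg hlast]

-- A's loop never completes a row when m < 0
lemma foldA_neg (m : Int) (hm : m < 0) :
    ∀ (l : List Char) (j : Nat) (st : List (List Char) × List Char),
      ((PySem.List.enumerate l (j : Int)).foldl (solutionStep m) st).1 = st.1 := by
  intro l
  induction l with
  | nil => intro j st; simp [PySem.List.enumerate_nil]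
  | cons v l ih =>
    intro j st
    have hcast : ((j : Int) + 1) = ((j + 1 : Nat) : Int) := by push_cast; ring
    rw [PySem.List.enumerate_cons, List.foldl_cons, hcast, ih]
    have hb := PySem.Int.mod_neg_bounds (j : Int) hm
    simp only [solutionStep, beq_iff_eq]
    rw [if_neg (by omega)]
    split_ifs with h2 h3
    · rfl
    · exfalso; omega
    · rfl

-- B's row count is 0 for m < 0 (the length is nonnegative)
lemma floordiv_nonpos_of_neg (n m : Int) (hn : 0 ≤ n) (hm : m < 0) :
    PySem.Int.floordiv n m ≤ 0 := by
  have h1 := PySem.Int.floordiv_mul_add_mod n m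
  have h2 := PySem.Int.mod_neg_bounds n hm
  by_contra h
  have hq : 1 ≤ PySem.Int.floordiv n m := by omega
  nlinarith [h1, h2.1, h2.2, hq]

theorem solution_spec : Claim_equal_solution := by
  intro s m c _ hpre
  unfold Spec_solution solution solution_alt
  obtain ⟨hm0, _⟩ := hpre
  rcases lt_or_gt_of_ne hm0 with hneg | hpos
  · -- m < 0 : both sides are the empty string
    have hz : (0 : Int) = ((0 : Nat) : Int) := by norm_num
    conv_lhs => rw [hz]
    rw [foldA_neg m hneg s.toList 0 ([], [])]
    have hrows : PySem.Int.floordiv (s.toList.length : Int) m ≤ 0 :=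
      floordiv_nonpos_of_neg _ _ (by positivity) hneg
    rw [PySem.List.pyRange_one_eq_nil hrows]
    simp
  · -- 1 ≤ m
    obtain ⟨M, rfl⟩ : ∃ M : Nat, m = (M : Int) := ⟨m.toNat, (Int.toNat_of_nonneg (by omega)).symm⟩
    have hM : 1 ≤ M := by exact_mod_cast hpos
    have hz : (0 : Int) = ((0 : Nat) : Int) := by norm_num
    conv_lhs => rw [hz]
    rw [foldA (M : Int) M rfl hM s.toList 0 [] [],
      rowsFrom_spec M hM s.toList 0 [], if_pos (Nat.zero_mod M),
      List.nil_append, PySem.List.foldl_append_singleton_eq_map,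
      PySem.Int.floordiv_natCast, PySem.List.pyRange_zero_nat, List.map_map]
    unfold grp
    rw [List.map_map]
    congr 1
    apply List.map_congr_left
    intro r _
    simp only [Function.comp_apply]
    have hc : ((r : Int) * (M : Int)) = ((r * M : Nat) : Int) := by push_cast; ring
    rw [hc, PySem.List.slice_natCast_add]
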